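-- pv_equiv track=rewrite | github.com/JulienPatricWagnieres/ProgrammingLab | es2.2.py | is_in_time_series
-- ===== SOURCE A (Python) =====
-- def is_in_time_series(time_series,first_year,last_year):#verifico che gli anni inseriti siano nella time_series
--     fy=False
--     ly=False
--     for data in time_series:
--
--         if data[0][:4] == first_year:
--             fy=True
--         if data[0][:4] == last_year:
--             ly=True
--         if fy and ly:
--             return True
--     return False
-- ===== SOURCE B (Python) =====
-- def _has_year(series, year):
--     for data in series:
--         if data[0][:4] == year:
--             return True
--     return False
--
-- def is_in_time_series(time_series, first_year, last_year):
--     return _has_year(time_series, first_year) and _has_year(time_series, last_year)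
-- ===== Notes on version B (the rewrite author's own statement) =====
-- stated objective: simpler
-- what changed: Replaces A's single interleaved loop maintaining two mutable flags with two independent staged scans through a dedicated _has_year helper, one per queried year, eliminating all loop state.
import Mathlib
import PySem

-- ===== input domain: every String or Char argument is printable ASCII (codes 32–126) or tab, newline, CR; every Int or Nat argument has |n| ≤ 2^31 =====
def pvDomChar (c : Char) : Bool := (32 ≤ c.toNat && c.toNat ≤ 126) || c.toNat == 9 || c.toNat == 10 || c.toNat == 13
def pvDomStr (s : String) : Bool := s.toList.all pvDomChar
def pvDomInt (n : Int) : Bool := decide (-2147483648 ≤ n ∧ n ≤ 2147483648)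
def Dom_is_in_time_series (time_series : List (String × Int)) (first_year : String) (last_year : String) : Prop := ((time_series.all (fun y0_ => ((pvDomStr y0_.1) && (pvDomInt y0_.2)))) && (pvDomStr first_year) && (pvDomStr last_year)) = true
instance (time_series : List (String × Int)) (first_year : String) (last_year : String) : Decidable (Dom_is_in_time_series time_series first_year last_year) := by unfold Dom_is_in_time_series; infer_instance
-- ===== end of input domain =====

-- B replaces A's interleaved two-flag loop by two independent staged scans (a _has_year helper per queried year), no loop state (simpler; same cost).


-- ===== PORT A =====
-- data[0][:4], exact via PySem.Str.slice
def pvPrefix4 (s : String) : String := PySem.Str.slice s none (some 4)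

-- A's for-loop with mutable flags fy, ly and the early 'return True'
def pvLoopA (first_year last_year : String) : List (String × Int) → Bool → Bool → Bool
  | [], _, _ => false
  | data :: rest, fy, ly =>
    let fy := if pvPrefix4 data.1 == first_year then true else fy
    let ly := if pvPrefix4 data.1 == last_year then true else ly
    if fy && ly then true else pvLoopA first_year last_year rest fy ly

def is_in_time_series (time_series : List (String × Int)) (first_year : String) (last_year : String) : Bool :=
  pvLoopA first_year last_year time_series false false

-- ===== PORT B =====
-- Source B's _has_year: one dedicated early-exit scan for a single year
def pvHasYear (series : List (String × Int)) (year : String) : Bool :=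
  match series with
  | [] => false
  | data :: rest => if pvPrefix4 data.1 == year then true else pvHasYear rest year

def is_in_time_series_alt (time_series : List (String × Int)) (first_year : String) (last_year : String) : Bool :=
  pvHasYear time_series first_year && pvHasYear time_series last_year

-- ===== PRECONDITION & SPEC =====
def Spec_is_in_time_series (time_series : List (String × Int)) (first_year : String) (last_year : String) (out : Bool) : Prop := out = is_in_time_series_alt time_series first_year last_year
instance (time_series : List (String × Int)) (first_year : String) (last_year : String) (out : Bool) : Decidable (Spec_is_in_time_series time_series first_year last_year out) := by unfold Spec_is_in_time_series; infer_instance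

-- ===== CLAIM (what is proved, stated in full; the proofs are below) =====
def Claim_equal_is_in_time_series : Prop := ∀ (time_series : List (String × Int)) (first_year : String) (last_year : String), Dom_is_in_time_series time_series first_year last_year → Spec_is_in_time_series time_series first_year last_year (is_in_time_series time_series first_year last_year)

-- ===== LEMMAS AND PROOFS =====

-- A's loop computes "(fy ∨ some prefix equals first_year) ∧ (ly ∨ some prefix equals last_year)",
-- provided it is entered with flags not yet both true.
theorem pvLoopA_eq (f l : String) (ts : List (String × Int)) (fy ly : Bool)
    (h : (fy && ly) = false) :
    pvLoopA f l ts fy ly =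
      ((fy || ts.any (fun d => pvPrefix4 d.1 == f)) && (ly || ts.any (fun d => pvPrefix4 d.1 == l))) := by
  induction ts generalizing fy ly with
  | nil => simp only [pvLoopA, List.any_nil, Bool.or_false]; exact h.symm
  | cons d rest ih =>
    simp only [pvLoopA, List.any_cons]
    by_cases hb : (((if pvPrefix4 d.1 == f then true else fy) && (if pvPrefix4 d.1 == l then true else ly)) = true)
    · simp only [hb, if_true]
      cases hf : (pvPrefix4 d.1 == f) <;> cases hl : (pvPrefix4 d.1 == l) <;>
        simp [hf, hl] at hb ⊢ <;> simp [hb]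
    · rw [if_neg (by simpa using hb), ih _ _ (by simpa using hb)]
      cases (pvPrefix4 d.1 == f) <;> cases (pvPrefix4 d.1 == l) <;> simp

-- B's single-year scan is List.any
theorem pvHasYear_eq_any (ts : List (String × Int)) (y : String) :
    pvHasYear ts y = ts.any (fun d => pvPrefix4 d.1 == y) := by
  induction ts with
  | nil => rfl
  | cons d rest ih =>
    simp only [pvHasYear, List.any_cons]
    cases h : (pvPrefix4 d.1 == y) <;> simp [ih]

-- ===== VERDICT (by name: the statement is the Claim_ definition above) =====
theorem is_in_time_series_spec : Claim_equal_is_in_time_series := by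
  intro ts f l _
  unfold Spec_is_in_time_series is_in_time_series is_in_time_series_alt
  rw [pvLoopA_eq f l ts false false rfl, pvHasYear_eq_any, pvHasYear_eq_any]
  simp
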